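-- pv_equiv track=rewrite | github.com/mattbjohnson2012/Dynasty-Prospect-Tool | data/dashboard.py | _trim_mlb_report_text
-- ===== SOURCE A (Python) =====
-- def _safe_str(x) -> str:
--     if x is None:
--         return ""
--     s = str(x)
--     if s.lower() in {"nan", "none"}:
--         return ""
--     return s.strip()
--
-- def _trim_mlb_report_text(txt: str) -> str:
--     """
--     MLB prospect pages sometimes include huge extra sections after the report
--     (Last Prospect / Next Prospect / Prospect Headlines / videos).
--     Trim aggressively so the UI shows only the report.
--     """
--     txt = _safe_str(txt)
--     if not txt:
--         return ""
--
--     markers = [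
--         "Last Prospect",
--         "Next Prospect",
--         "Prospect Headlines",
--         "Prospects Headlines",
--         "Prospect Highlights",
--         "Prospects News",
--         "More Prospects News",
--         "Prospect Highlight",
--     ]
--
--     cut = len(txt)
--     for m in markers:
--         i = txt.find(m)
--         if i != -1:
--             cut = min(cut, i)
--
--     trimmed = txt[:cut].strip()
--     trimmed = "\n".join([line.rstrip() for line in trimmed.splitlines()]).strip()
--     return trimmed
-- ===== SOURCE B (Python) =====
-- def _safe_str(x) -> str:
--     if x is None:
--         return ""
--     s = str(x)
--     if s.lower() in {"nan", "none"}: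
--         return ""
--     return s.strip()
--
-- _MARKERS = (
--     "Last Prospect",
--     "Next Prospect",
--     "Prospect Headlines",
--     "Prospects Headlines",
--     "Prospect Highlights",
--     "Prospects News",
--     "More Prospects News",
--     "Prospect Highlight",
-- )
--
-- def _trim_mlb_report_text(txt: str) -> str:
--     txt = _safe_str(txt)
--     if not txt:
--         return ""
--     # single left-to-right scan: stop at the first position where any marker starts
--     cut = len(txt)
--     for i in range(len(txt)):
--         if txt.startswith(_MARKERS, i):
--             cut = i
--             break
--     trimmed = txt[:cut].strip()
--     return "\n".join(line.rstrip() for line in trimmed.splitlines()).strip()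
-- ===== Notes on version B (the rewrite author's own statement) =====
-- stated objective: alternative
-- what changed: Replaces the per-marker find() passes plus running-min with one left-to-right scan of the text that stops at the first position where any marker starts (a single startswith(tuple, i) loop).
import Mathlib
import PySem

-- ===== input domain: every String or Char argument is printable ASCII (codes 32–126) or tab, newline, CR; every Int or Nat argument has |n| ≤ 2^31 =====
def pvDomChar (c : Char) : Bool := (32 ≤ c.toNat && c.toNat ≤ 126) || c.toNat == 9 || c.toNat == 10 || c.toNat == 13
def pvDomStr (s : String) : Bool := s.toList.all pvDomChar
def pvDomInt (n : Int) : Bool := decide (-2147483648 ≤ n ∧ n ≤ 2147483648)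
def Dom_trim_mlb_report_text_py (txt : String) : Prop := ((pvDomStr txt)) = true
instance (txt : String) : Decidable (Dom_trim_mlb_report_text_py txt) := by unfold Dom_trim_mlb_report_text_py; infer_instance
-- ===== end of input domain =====

-- B changes the marker search: one left-to-right scan stopping at the first position where any
-- marker starts, instead of A's per-marker find() passes combined with a running minimum.

-- ===== PORT A =====
-- _safe_str (txt is a str here, so str(x) is txt itself and x is not None)
def safe_str_A (x : String) : String :=
  if PySem.Str.lower x = "nan" ∨ PySem.Str.lower x = "none" then ""
  else PySem.Str.strip x

def markersA : List String :=
  ["Last Prospect", "Next Prospect", "Prospect Headlines", "Prospects Headlines",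
   "Prospect Highlights", "Prospects News", "More Prospects News", "Prospect Highlight"]

def trim_mlb_report_text_py (txt : String) : String :=
  let s := safe_str_A txt
  if s = "" then ""
  else
    -- cut = len(txt); for m in markers: i = txt.find(m); if i != -1: cut = min(cut, i)
    let cut : Int := markersA.foldl
      (fun cut m => let i := PySem.Str.find s m; if i ≠ -1 then min cut i else cut)
      (PySem.Str.len s)
    let trimmed := PySem.Str.strip (PySem.Str.slice s none (some cut))
    PySem.Str.strip (PySem.Str.join "\n" ((PySem.Str.splitlines trimmed).map PySem.Str.rstrip))

-- ===== PORT B =====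
def safe_str_B (x : String) : String :=
  if PySem.Str.lower x = "nan" ∨ PySem.Str.lower x = "none" then ""
  else PySem.Str.strip x

def markersB : List (List Char) :=
  ["Last Prospect".toList, "Next Prospect".toList, "Prospect Headlines".toList,
   "Prospects Headlines".toList, "Prospect Highlights".toList, "Prospects News".toList,
   "More Prospects News".toList, "Prospect Highlight".toList]

-- 'for i in range(len(txt)): if txt.startswith(markers, i): cut = i; break' —
-- txt.startswith(tuple, i) is: some marker is a prefix of the suffix at i (exact on this use).
def bScan (M : List (List Char)) (total : Nat) : List Char → Nat → Nat
  | [], _ => total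
  | c :: rest, i =>
      if M.any (fun m => PySem.Chars.startswith (c :: rest) m) then i
      else bScan M total rest (i + 1)

def trim_mlb_report_text_py_alt (txt : String) : String :=
  let s := safe_str_B txt
  if s = "" then ""
  else
    let cs := s.toList
    let cut : Nat := bScan markersB cs.length cs 0
    let trimmed := PySem.Str.strip (PySem.Str.slice s none (some (cut : Int)))
    PySem.Str.strip (PySem.Str.join "\n" ((PySem.Str.splitlines trimmed).map PySem.Str.rstrip))

-- ===== PRECONDITION & SPEC =====
def Spec_trim_mlb_report_text_py (txt : String) (out : String) : Prop := out = trim_mlb_report_text_py_alt txt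
instance (txt : String) (out : String) : Decidable (Spec_trim_mlb_report_text_py txt out) := by unfold Spec_trim_mlb_report_text_py; infer_instance

-- ===== CLAIM (what is proved, stated in full; the proofs are below) =====
def Claim_equal_trim_mlb_report_text_py : Prop := ∀ (txt : String), Dom_trim_mlb_report_text_py txt → Spec_trim_mlb_report_text_py txt (trim_mlb_report_text_py txt)

-- ===== LEMMAS AND PROOFS =====

-- a "hit" at a suffix: some marker starts there
def hitAt (M : List (List Char)) (t : List Char) : Prop :=
  ∃ m ∈ M, m <+: t

lemma any_startswith_iff (M : List (List Char)) (t : List Char) :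
    (M.any (fun m => PySem.Chars.startswith t m)) = true ↔ hitAt M t := by
  simp [List.any_eq_true, hitAt, PySem.Chars.startswith_iff]

-- characterisation of B's scan
lemma bScan_spec (M : List (List Char)) (total : Nat) :
    ∀ (s : List Char) (i : Nat), total = i + s.length →
      i ≤ bScan M total s i ∧ bScan M total s i ≤ total ∧
      (∀ j, i ≤ j → j < bScan M total s i → ¬ hitAt M (s.drop (j - i))) ∧
      (bScan M total s i < total → hitAt M (s.drop (bScan M total s i - i))) := by
  intro s
  induction s with
  | nil =>
      intro i h
      simp only [List.length_nil, Nat.add_zero] at h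
      subst h
      refine ⟨by simp [bScan], by simp [bScan], ?_, ?_⟩
      · intro j hj1 hj2
        simp only [bScan] at hj2
        exact absurd hj2 (by omega)
      · intro h'
        simp only [bScan] at h'
        exact absurd h' (by omega)
  | cons c rest ih =>
      intro i h
      simp only [List.length_cons] at h
      by_cases hhit : (M.any (fun m => PySem.Chars.startswith (c :: rest) m)) = true
      · rw [show bScan M total (c :: rest) i = i from by simp [bScan, hhit]]
        refine ⟨le_refl _, by omega, ?_, ?_⟩
        · intro j h1 h2; exact absurd h2 (by omega)
        · intro _
          simpa using (any_startswith_iff M (c :: rest)).mp hhit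
      · rw [show bScan M total (c :: rest) i = bScan M total rest (i + 1) from by
            simp [bScan, hhit]]
        obtain ⟨h1, h2, h3, h4⟩ := ih (i + 1) (by omega)
        refine ⟨by omega, h2, ?_, ?_⟩
        · intro j hj1 hj2
          by_cases hji : j = i
          · rw [show j - i = 0 from by omega, List.drop_zero]
            exact fun hh => hhit ((any_startswith_iff M _).mpr hh)
          · have hne := h3 j (by omega) hj2
            have hd : (c :: rest).drop (j - i) = rest.drop (j - (i + 1)) := by
              have hji : j - i = (j - (i + 1)) + 1 := by omega
              simp [hji]
            rw [hd]; exact hne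
        · intro hlt
          have hr := h4 hlt
          have hge : i + 1 ≤ bScan M total rest (i + 1) := h1
          have hd : (c :: rest).drop (bScan M total rest (i + 1) - i)
              = rest.drop (bScan M total rest (i + 1) - (i + 1)) := by
            have hji : bScan M total rest (i + 1) - i
                = (bScan M total rest (i + 1) - (i + 1)) + 1 := by omega
            simp [hji]
          rw [hd]; exact hr

-- characterisation of A's running-min fold (generic in the find function)
lemma foldMin_spec (f : String → Int) :
    ∀ (ms : List String) (acc : Int),
      (ms.foldl (fun cut m => if f m = -1 then cut else min cut (f m)) acc) ≤ acc ∧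
      ((ms.foldl (fun cut m => if f m = -1 then cut else min cut (f m)) acc) = acc ∨
        ∃ m ∈ ms, f m ≠ -1 ∧
          (ms.foldl (fun cut m => if f m = -1 then cut else min cut (f m)) acc) = f m) ∧
      (∀ m ∈ ms, f m ≠ -1 →
        (ms.foldl (fun cut m => if f m = -1 then cut else min cut (f m)) acc) ≤ f m) := by
  intro ms
  induction ms with
  | nil => intro acc; exact ⟨le_refl _, Or.inl rfl, by simp⟩
  | cons m ms ih =>
      intro acc
      by_cases hm : f m = -1
      · obtain ⟨h1, h2, h3⟩ := ih acc
        rw [List.foldl_cons, if_pos hm] at *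
        refine ⟨h1, ?_, ?_⟩
        · rcases h2 with h | ⟨m', hm', hne, he⟩
          · exact Or.inl h
          · exact Or.inr ⟨m', List.mem_cons_of_mem _ hm', hne, he⟩
        · intro m' hm' hne
          rcases List.mem_cons.mp hm' with rfl | hm'
          · exact absurd hm hne
          · exact h3 m' hm' hne
      · obtain ⟨h1, h2, h3⟩ := ih (min acc (f m))
        rw [List.foldl_cons, if_neg hm] at *
        refine ⟨le_trans h1 (min_le_left _ _), ?_, ?_⟩
        · rcases h2 with h | ⟨m', hm', hne, he⟩
          · rcases le_total acc (f m) with hle | hle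
            · exact Or.inl (by rw [min_eq_left hle] at h ⊢; exact h)
            · exact Or.inr ⟨m, List.mem_cons_self, hm, by rw [min_eq_right hle] at h ⊢; exact h⟩
          · exact Or.inr ⟨m', List.mem_cons_of_mem _ hm', hne, he⟩
        · intro m' hm' hne
          rcases List.mem_cons.mp hm' with rfl | hm'
          · exact le_trans h1 (min_le_right _ _)
          · exact h3 m' hm' hne

-- markersB is markersA on the char-list side
lemma markersB_eq : markersB = markersA.map String.toList := by decide

lemma hitAt_iff (t : List Char) (j : Nat) :
    hitAt markersB (t.drop j) ↔ ∃ m ∈ markersA, m.toList <+: t.drop j := by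
  rw [markersB_eq]
  constructor
  · rintro ⟨mb, hmb, hp⟩
    rcases List.mem_map.mp hmb with ⟨m, hm, rfl⟩
    exact ⟨m, hm, hp⟩
  · rintro ⟨m, hm, hp⟩
    exact ⟨m.toList, List.mem_map.mpr ⟨m, hm, rfl⟩, hp⟩

-- the two cut positions agree
lemma cut_eq (t : String) :
    (markersA.foldl
      (fun cut m => let i := PySem.Str.find t m; if i ≠ -1 then min cut i else cut)
      (PySem.Str.len t))
    = ((bScan markersB t.toList.length t.toList 0 : Nat) : Int) := by
  have hrw : (markersA.foldl
      (fun cut m => let i := PySem.Str.find t m; if i ≠ -1 then min cut i else cut)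
      (PySem.Str.len t))
      = (markersA.foldl
      (fun cut m => if PySem.Str.find t m = -1 then cut else min cut (PySem.Str.find t m))
      (PySem.Str.len t)) := by
    simp only [ite_not]
  rw [hrw]
  obtain ⟨g1, g2, g3⟩ := foldMin_spec (fun m => PySem.Str.find t m) markersA (PySem.Str.len t)
  obtain ⟨h1, h2, h3, h4⟩ := bScan_spec markersB t.toList.length t.toList 0 (by omega)
  set r := bScan markersB t.toList.length t.toList 0 with hr
  set cutA := markersA.foldl
      (fun cut m => if PySem.Str.find t m = -1 then cut else min cut (PySem.Str.find t m))
      (PySem.Str.len t) with hc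
  have hlen : PySem.Str.len t = (t.toList.length : Int) := by simp [PySem.Str.len_eq]
  apply le_antisymm
  · -- cutA ≤ r
    rcases Nat.lt_or_ge r t.toList.length with hlt | hge
    · have hh := h4 hlt
      rw [Nat.sub_zero] at hh
      rcases (hitAt_iff t.toList r).mp hh with ⟨m, hm, hp⟩
      have hinf : m.toList <:+: t.toList :=
        hp.isInfix.trans (List.drop_suffix _ _).isInfix
      have hne : PySem.Str.find t m ≠ -1 := by
        rw [PySem.Str.find_ne_neg_one_iff]; exact hinf
      have hca := g3 m hm hne
      have hf0 : 0 ≤ PySem.Chars.find t.toList m.toList := by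
        have := PySem.Chars.neg_one_le_find t.toList m.toList
        have hne' : PySem.Chars.find t.toList m.toList ≠ -1 := by
          simpa [PySem.Str.find_eq] using hne
        omega
      obtain ⟨_, hmin⟩ := PySem.Chars.find_spec hf0
      have hle : (PySem.Chars.find t.toList m.toList).toNat ≤ r := by
        by_contra hcon
        exact hmin r (by omega) hp
      calc cutA ≤ PySem.Str.find t m := hca
        _ = PySem.Chars.find t.toList m.toList := by simp [PySem.Str.find_eq]
        _ ≤ (r : Int) := by omega
    · have hreq : r = t.toList.length := le_antisymm h2 hge
      rw [hreq]
      rw [hlen] at g1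
      exact g1
  · -- r ≤ cutA
    rcases g2 with he | ⟨m, hm, hne, he⟩
    · rw [he, hlen]
      exact_mod_cast h2
    · have hf0 : 0 ≤ PySem.Chars.find t.toList m.toList := by
        have := PySem.Chars.neg_one_le_find t.toList m.toList
        have hne' : PySem.Chars.find t.toList m.toList ≠ -1 := by
          simpa [PySem.Str.find_eq] using hne
        omega
      obtain ⟨hpre, _⟩ := PySem.Chars.find_spec hf0
      have hhit : hitAt markersB (t.toList.drop (PySem.Chars.find t.toList m.toList).toNat) :=
        (hitAt_iff _ _).mpr ⟨m, hm, hpre⟩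
      have hler : r ≤ (PySem.Chars.find t.toList m.toList).toNat := by
        by_contra hcon
        have hno := h3 (PySem.Chars.find t.toList m.toList).toNat (by omega) (by omega)
        rw [Nat.sub_zero] at hno
        exact hno hhit
      rw [he]
      have hfe : PySem.Str.find t m = PySem.Chars.find t.toList m.toList := by
        simp [PySem.Str.find_eq]
      rw [hfe]
      omega

-- ===== VERDICT (by name: the statement is the Claim_ definition above) =====
theorem trim_mlb_report_text_py_spec : Claim_equal_trim_mlb_report_text_py := by
  intro txt _
  unfold Spec_trim_mlb_report_text_py trim_mlb_report_text_py trim_mlb_report_text_py_alt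
  have hsafe : safe_str_A txt = safe_str_B txt := rfl
  rw [hsafe]
  by_cases h : safe_str_B txt = ""
  · simp [h]
  · rw [if_neg h, if_neg h]
    simp only [cut_eq (safe_str_B txt)]
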